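-- pv_equiv track=rewrite | github.com/Kirill-Kasatkin/PL-Kasatkin | Практика 7.py | Y
-- ===== SOURCE A (Python) =====
-- def Y(a, b, c, n):
--     spisok = [4, 2, 7, 9, 6, 3]  # список из цифр
--     count = 0
--     for n1 in spisok:  # каждая цифра должна побывать на 1-м месте
--         for n2 in spisok:  # каждая цифра должна побывать на 2-м месте
--             for n3 in spisok:  # каждая цифра должна побывать на 3-м месте
--                 x = n3 * 100 + n2 * 10 + n1  # воспроизводим число
--                 if x >= 100 and x <= n:  # проверяем
--                     count += 1
--     return count
-- ===== SOURCE B (Python) =====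
-- def Y(a, b, c, n):
--     # Instead of enumerating digit triples, walk the numeric range [222, 999]
--     # (the smallest/largest numbers buildable from the digit set) up to n and
--     # test each number's three digits for membership in the digit set.
--     digits = {2, 3, 4, 6, 7, 9}
--     count = 0
--     for x in range(222, min(n, 999) + 1):
--         if x // 100 in digits and x // 10 % 10 in digits and x % 10 in digits:
--             count += 1
--     return count
-- ===== Notes on version B (the rewrite author's own statement) =====
-- stated objective: alternative
-- what changed: Replaces A's triple nested loop over digit triples with a single pass over the numeric interval [222, min(n, 999)] that tests each number's three digits for membership in the digit set; correct because the six digits are distinct, so each constructible number arises from exactly one triple.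
import Mathlib
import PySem

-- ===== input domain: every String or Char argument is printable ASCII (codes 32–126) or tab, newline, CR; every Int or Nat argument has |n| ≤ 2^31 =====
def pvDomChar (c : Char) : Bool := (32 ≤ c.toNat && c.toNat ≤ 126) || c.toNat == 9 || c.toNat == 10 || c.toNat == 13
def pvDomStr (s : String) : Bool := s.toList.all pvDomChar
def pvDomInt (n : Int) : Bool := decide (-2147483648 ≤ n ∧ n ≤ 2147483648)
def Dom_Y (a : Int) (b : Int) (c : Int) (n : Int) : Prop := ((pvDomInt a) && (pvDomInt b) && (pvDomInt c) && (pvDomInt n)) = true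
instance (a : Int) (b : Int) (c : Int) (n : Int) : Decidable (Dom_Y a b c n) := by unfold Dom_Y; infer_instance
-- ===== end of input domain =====

-- B walks the numeric range [222, min(n, 999)] once and tests each number's three digits
-- for membership in the digit set, instead of A's triple loop over digit triples; alternative algorithm, same result.

-- ===== PORT A =====
def Y (a : Int) (b : Int) (c : Int) (n : Int) : Int :=
  let spisok : List Int := [4, 2, 7, 9, 6, 3]
  spisok.foldl (fun count n1 =>
    spisok.foldl (fun count n2 =>
      spisok.foldl (fun count n3 =>
        let x := n3 * 100 + n2 * 10 + n1
        if x ≥ 100 ∧ x ≤ n then count + 1 else count) count) count) 0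

-- ===== PORT B =====
def Y_alt (a : Int) (b : Int) (c : Int) (n : Int) : Int :=
  let digits : PySem.Set Int := PySem.Set.ofList [2, 3, 4, 6, 7, 9]
  (PySem.List.pyRange 222 (min n 999 + 1) 1).foldl (fun count x =>
    if PySem.Set.contains digits (PySem.Int.floordiv x 100) &&
       PySem.Set.contains digits (PySem.Int.mod (PySem.Int.floordiv x 10) 10) &&
       PySem.Set.contains digits (PySem.Int.mod x 10)
    then count + 1 else count) 0

-- ===== PRECONDITION & SPEC =====
def Spec_Y (a : Int) (b : Int) (c : Int) (n : Int) (out : Int) : Prop := out = Y_alt a b c n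
instance (a : Int) (b : Int) (c : Int) (n : Int) (out : Int) : Decidable (Spec_Y a b c n out) := by unfold Spec_Y; infer_instance

-- ===== CLAIM (what is proved, stated in full; the proofs are below) =====
def Claim_equal_Y : Prop := ∀ (a : Int) (b : Int) (c : Int) (n : Int), Dom_Y a b c n → Spec_Y a b c n (Y a b c n)

-- ===== LEMMAS AND PROOFS =====

-- B's digit test as a standalone predicate (definitionally the one Y_alt folds with)
def pvPred (x : Int) : Bool :=
  PySem.Set.contains (PySem.Set.ofList ([2, 3, 4, 6, 7, 9] : List Int)) (PySem.Int.floordiv x 100) &&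
  PySem.Set.contains (PySem.Set.ofList ([2, 3, 4, 6, 7, 9] : List Int)) (PySem.Int.mod (PySem.Int.floordiv x 10) 10) &&
  PySem.Set.contains (PySem.Set.ofList ([2, 3, 4, 6, 7, 9] : List Int)) (PySem.Int.mod x 10)

-- the candidate list A's triple loop traverses, flattened
def pvProd : List Int :=
  ([4, 2, 7, 9, 6, 3] : List Int).flatMap (fun n1 =>
    ([4, 2, 7, 9, 6, 3] : List Int).flatMap (fun n2 =>
      ([4, 2, 7, 9, 6, 3] : List Int).map (fun n3 => n3 * 100 + n2 * 10 + n1)))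

lemma countP_flatMap_sum (l : List Int) (f : Int → List Int) (p : Int → Bool) :
    (l.flatMap f).countP p = (l.map fun a => (f a).countP p).sum := by
  induction l with
  | nil => simp
  | cons h t ih => simp [List.countP_append, ih]

-- A's counting loop body, with a Prop condition, as a countP
lemma foldl_if_prop (P : Int → Prop) [DecidablePred P] (l : List Int) (c : Int) :
    l.foldl (fun acc x => if P x then acc + 1 else acc) c
      = c + ((l.countP fun x => decide (P x)) : Int) := by
  rw [← PySem.List.foldl_count_if]
  congr 1
  funext acc x
  by_cases h : P x <;> simp [h]

-- A's nested counting loops count the predicate over the flattened candidate list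
lemma triple_loop (l : List Int) (n : Int) :
    l.foldl (fun count n1 =>
      l.foldl (fun count n2 =>
        l.foldl (fun count n3 =>
          if n3 * 100 + n2 * 10 + n1 ≥ 100 ∧ n3 * 100 + n2 * 10 + n1 ≤ n then count + 1
          else count) count) count) 0
    = (((l.flatMap fun n1 => l.flatMap fun n2 => l.map fun n3 => n3 * 100 + n2 * 10 + n1).countP
        fun x => decide (x ≥ 100 ∧ x ≤ n)) : Int) := by
  simp only [foldl_if_prop, PySem.List.foldl_add, zero_add, countP_flatMap_sum,
    List.countP_map, Function.comp_def]
  push_cast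
  simp [List.map_map, Function.comp_def]

lemma Y_eq_countP (a b c n : Int) :
    Y a b c n = (pvProd.countP (fun x => decide (x ≥ 100 ∧ x ≤ n)) : Int) := by
  exact triple_loop [4, 2, 7, 9, 6, 3] n

-- the flattened candidate list is, as a multiset, exactly the numbers of [222, 999] passing B's digit test
set_option maxRecDepth 10000 in
lemma pvProd_perm : pvProd.Perm ((PySem.List.pyRange 222 1000 1).filter pvPred) := by decide

-- B's loop counts its digit test over the clipped range
lemma Y_alt_eq_countP (a b c n : Int) :
    Y_alt a b c n = ((PySem.List.pyRange 222 (min n 999 + 1) 1).countP pvPred : Int) := by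
  show (PySem.List.pyRange 222 (min n 999 + 1) 1).foldl _ 0 = _
  rw [PySem.List.foldl_count_if, zero_add]
  rfl

-- ===== VERDICT (by name: the statement is the Claim_ definition above) =====
theorem Y_spec : Claim_equal_Y := by
  intro a b c n _
  show Y a b c n = Y_alt a b c n
  rw [Y_eq_countP, Y_alt_eq_countP, pvProd_perm.countP_eq, List.countP_filter]
  by_cases hn : n < 222
  · have hA : (PySem.List.pyRange 222 1000 1).countP
        (fun x => decide (x ≥ 100 ∧ x ≤ n) && pvPred x) = 0 := by
      apply List.countP_eq_zero.2
      intro x hx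
      have := (PySem.List.mem_pyRange_one).1 hx
      simp only [Bool.and_eq_true, decide_eq_true_eq, not_and]
      intro h
      omega
    have hB : PySem.List.pyRange 222 (min n 999 + 1) 1 = [] :=
      PySem.List.pyRange_one_eq_nil (by omega)
    rw [hA, hB]
    simp
  · have h1 : (222 : Int) ≤ min n 999 + 1 := by omega
    have h2 : min n 999 + 1 ≤ 1000 := by omega
    rw [PySem.List.pyRange_one_append 222 (min n 999 + 1) 1000 h1 h2, List.countP_append]
    have hright : (PySem.List.pyRange (min n 999 + 1) 1000 1).countP
        (fun x => decide (x ≥ 100 ∧ x ≤ n) && pvPred x) = 0 := by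
      apply List.countP_eq_zero.2
      intro x hx
      have := (PySem.List.mem_pyRange_one).1 hx
      simp only [Bool.and_eq_true, decide_eq_true_eq, not_and]
      intro h
      omega
    have hleft : (PySem.List.pyRange 222 (min n 999 + 1) 1).countP
        (fun x => decide (x ≥ 100 ∧ x ≤ n) && pvPred x)
        = (PySem.List.pyRange 222 (min n 999 + 1) 1).countP pvPred := by
      apply List.countP_congr
      intro x hx
      have := (PySem.List.mem_pyRange_one).1 hx
      constructor
      · intro h
        simp only [Bool.and_eq_true] at h
        exact h.2
      · intro h
        simp only [Bool.and_eq_true, decide_eq_true_eq]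
        exact ⟨by omega, h⟩
    rw [hright, hleft]
    simp
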